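-- pv_equiv track=rewrite | github.com/MinKyeom/KMK-DREAM | Programmers/Lv0/코드 처리하기.py | solution
-- ===== SOURCE A (Python) =====
-- def solution(code):
--     mode = 0
--     result = []
--     if len(code) == 0:
--         return "EMPTY"
--
--     for x in range(len(code)):
--         if code[x] == "1":
--             if mode == 0:
--                 mode = 1
--                 continue
--             elif mode == 1:
--                 mode = 0
--                 continue
--
--         else:
--             if mode == 0 and x % 2 == 0:
--                 result.append(code[x])
--
--             elif mode == 1 and x % 2 == 1:
--                 result.append(code[x])
--
--             else:
--                 continue
--
--     if len(result) == 0: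
--         return "EMPTY"
--
--     return "".join(result)
-- ===== SOURCE B (Python) =====
-- def solution(code):
--     if not code:
--         return "EMPTY"
--     out = []
--     pos = 0
--     for m, seg in enumerate(code.split("1")):
--         mode = m % 2
--         for j, ch in enumerate(seg):
--             if (pos + j) % 2 == mode:
--                 out.append(ch)
--         pos += len(seg) + 1
--     return "".join(out) or "EMPTY"
-- ===== Notes on version B (the rewrite author's own statement) =====
-- stated objective: alternative
-- what changed: B replaces A's per-character loop with a mutable mode flag by splitting the code on '1' into segments, deriving each segment's mode from its ordinal parity and filtering each segment by absolute-index parity.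
import Mathlib
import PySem

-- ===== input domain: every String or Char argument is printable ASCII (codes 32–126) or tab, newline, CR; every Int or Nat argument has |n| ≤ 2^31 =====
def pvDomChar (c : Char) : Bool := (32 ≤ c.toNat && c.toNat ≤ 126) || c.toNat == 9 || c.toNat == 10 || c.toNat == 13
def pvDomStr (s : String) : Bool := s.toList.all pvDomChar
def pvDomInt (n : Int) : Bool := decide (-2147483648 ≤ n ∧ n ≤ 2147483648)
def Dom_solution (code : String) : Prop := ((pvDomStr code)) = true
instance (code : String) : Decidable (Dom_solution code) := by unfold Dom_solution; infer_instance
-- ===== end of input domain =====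

-- B differs from A in decomposition only (split on '1', mode from segment ordinal); return values are identical on all inputs.

-- ===== PORT A =====
-- A's for-loop over range(len(code)) with the mutable `mode` flag and `result` accumulator.
def solutionLoopA (cs : List Char) (x mode : Nat) (acc : List Char) : List Char :=
  match cs with
  | [] => acc
  | c :: rest =>
    if c = '1' then
      if mode = 0 then solutionLoopA rest (x + 1) 1 acc
      else solutionLoopA rest (x + 1) 0 acc
    else
      if mode = 0 ∧ x % 2 = 0 then solutionLoopA rest (x + 1) mode (acc ++ [c])
      else if mode = 1 ∧ x % 2 = 1 then solutionLoopA rest (x + 1) mode (acc ++ [c])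
      else solutionLoopA rest (x + 1) mode acc

def solution (code : String) : String :=
  let cs := code.toList
  if cs.length = 0 then "EMPTY"
  else
    let result := solutionLoopA cs 0 0 []
    if result.length = 0 then "EMPTY" else String.ofList result

-- ===== PORT B =====
-- Python's code.split("1"): keeps empty segments, result list always nonempty.
def pySplit1 (cs : List Char) : List (List Char) :=
  match cs with
  | [] => [[]]
  | c :: rest =>
    if c = '1' then [] :: pySplit1 rest
    else
      match pySplit1 rest with
      | s :: ss => (c :: s) :: ss
      | [] => [[c]]

-- inner loop: chars of seg whose absolute index (pos+j) has parity = mode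
def segPick (seg : List Char) (pos mode : Nat) : List Char :=
  match seg with
  | [] => []
  | c :: rest => (if pos % 2 = mode then [c] else []) ++ segPick rest (pos + 1) mode

-- outer loop over enumerated segments, tracking the absolute start position
def solutionLoopB (parts : List (List Char)) (m pos : Nat) (acc : List Char) : List Char :=
  match parts with
  | [] => acc
  | seg :: rest => solutionLoopB rest (m + 1) (pos + seg.length + 1) (acc ++ segPick seg pos (m % 2))

def solution_alt (code : String) : String :=
  let cs := code.toList
  if cs = [] then "EMPTY"
  else
    let out := solutionLoopB (pySplit1 cs) 0 0 []
    if out = [] then "EMPTY" else String.ofList out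

-- ===== PRECONDITION & SPEC =====
def Spec_solution (code : String) (out : String) : Prop := out = solution_alt code
instance (code : String) (out : String) : Decidable (Spec_solution code out) := by unfold Spec_solution; infer_instance

-- ===== CLAIM (what is proved, stated in full; the proofs are below) =====
def Claim_equal_solution : Prop := ∀ (code : String), Dom_solution code → Spec_solution code (solution code)

-- ===== LEMMAS AND PROOFS =====

theorem pySplit1_ne_nil (cs : List Char) : pySplit1 cs ≠ [] := by
  cases cs with
  | nil => simp [pySplit1]
  | cons c rest =>
    simp only [pySplit1]
    split
    · simp
    · cases h : pySplit1 rest <;> simp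

theorem loops_eq (cs : List Char) : ∀ (x m : Nat) (acc : List Char),
    solutionLoopB (pySplit1 cs) m x acc = solutionLoopA cs x (m % 2) acc := by
  induction cs with
  | nil =>
    intro x m acc
    simp [pySplit1, solutionLoopB, segPick, solutionLoopA]
  | cons c rest ih =>
    intro x m acc
    by_cases hc : c = '1'
    · rcases Nat.mod_two_eq_zero_or_one m with h | h
      · have h' : (m + 1) % 2 = 1 := by omega
        simp [pySplit1, hc, solutionLoopB, segPick, ih, solutionLoopA, h, h']
      · have h' : (m + 1) % 2 = 0 := by omega
        simp [pySplit1, hc, solutionLoopB, segPick, ih, solutionLoopA, h, h']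
    · obtain ⟨s, ss, hs⟩ : ∃ s ss, pySplit1 rest = s :: ss := by
        cases h : pySplit1 rest with
        | nil => exact absurd h (pySplit1_ne_nil rest)
        | cons a b => exact ⟨a, b, rfl⟩
      have key : solutionLoopB (pySplit1 (c :: rest)) m x acc
          = solutionLoopB (pySplit1 rest) m (x + 1)
              (acc ++ (if x % 2 = m % 2 then [c] else [])) := by
        simp only [pySplit1, hc, if_false, hs, solutionLoopB, segPick, List.length_cons,
          List.append_assoc]
        ring_nf
      rw [key, ih]
      simp only [solutionLoopA, hc, if_false]
      rcases Nat.mod_two_eq_zero_or_one m with h | h <;>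
        rcases Nat.mod_two_eq_zero_or_one x with hx | hx <;>
          simp [h, hx]

theorem length_zero_iff (l : List Char) : l.length = 0 ↔ l = [] := List.length_eq_zero_iff

-- ===== VERDICT (by name: the statement is the Claim_ definition above) =====
theorem solution_spec : Claim_equal_solution := by
  intro code _
  unfold Spec_solution solution solution_alt
  simp only [length_zero_iff, loops_eq]
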